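-- pv_equiv track=rewrite | github.com/pc5401/my_BOJ | 백준/Gold/4913. 페르마의 크리스마스 정리/페르마의 크리스마스 정리.py | solve
-- ===== SOURCE A (Python) =====
-- def solve(queries: list[tuple[int,int]]) -> list[str]:
--     MAX = 10**6
--     is_prime = [True] * (MAX+1)
--     is_prime[0] = is_prime[1] = False
--     for i in range(2, int(MAX**0.5) + 1):
--         if is_prime[i]:
--             for j in range(i*i, MAX+1, i):
--                 is_prime[j] = False
--     ps_prime = [0] * (MAX+1)
--     ps_good = [0] * (MAX+1)
--     cnt_p = cnt_g = 0
--     for i in range(MAX+1):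
--         if is_prime[i]:
--             cnt_p += 1
--             if i == 2 or i % 4 == 1:
--                 cnt_g += 1
--         ps_prime[i] = cnt_p
--         ps_good[i] = cnt_g
--
--     results = []
--     for L, U in queries:
--         l = max(L, 2)
--         if l > U:
--             x = y = 0
--         else:
--             x = ps_prime[U] - ps_prime[l-1]
--             y = ps_good[U] - ps_good[l-1]
--         results.append(f"{L} {U} {x} {y}")
--     return results
-- ===== SOURCE B (Python) =====
-- def solve(queries: list[tuple[int, int]]) -> list[str]:
--     MAX = 10**6
--     is_prime = [True] * (MAX + 1)
--     is_prime[0] = is_prime[1] = False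
--     for i in range(2, int(MAX**0.5) + 1):
--         if is_prime[i]:
--             for j in range(i * i, MAX + 1, i):
--                 is_prime[j] = False
--
--     def answer(L: int, U: int) -> str:
--         x = y = 0
--         for n in range(max(L, 2), U + 1):
--             if is_prime[n]:
--                 x += 1
--                 if n == 2 or n % 4 == 1:
--                     y += 1
--         return f"{L} {U} {x} {y}"
--
--     return [answer(L, U) for L, U in queries]
-- ===== Notes on version B (the rewrite author's own statement) =====
-- stated objective: simpler
-- what changed: Dropped both million-entry prefix-sum arrays and the l>U special case; each query is answered by scanning is_prime directly over range(max(L,2), U+1), which is empty exactly when A's zero case fires.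
import Mathlib
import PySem

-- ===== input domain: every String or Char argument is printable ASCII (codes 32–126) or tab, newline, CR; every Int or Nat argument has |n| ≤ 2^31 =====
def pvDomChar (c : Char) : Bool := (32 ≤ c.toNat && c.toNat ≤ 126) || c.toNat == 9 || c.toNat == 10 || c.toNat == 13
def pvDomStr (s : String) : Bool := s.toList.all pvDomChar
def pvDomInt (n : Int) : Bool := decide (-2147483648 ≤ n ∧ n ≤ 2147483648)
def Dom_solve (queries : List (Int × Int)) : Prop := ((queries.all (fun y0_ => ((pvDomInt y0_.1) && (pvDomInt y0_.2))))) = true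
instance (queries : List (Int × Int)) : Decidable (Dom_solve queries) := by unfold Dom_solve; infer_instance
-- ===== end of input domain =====

-- B drops A's two million-entry prefix-sum arrays and the l>U special case: each query
-- scans is_prime directly over [max(L,2), U]. Objective: simpler.

-- ===== PORT A =====

-- Sieve of Eratosthenes, identical in both Pythons (is_prime of Source A / Source B).
-- int(10**6 ** 0.5) + 1 = 1001, so the outer range is range(2, 1001) = 2..1000.
-- range(i*i, MAX+1, i) has (MAX+1 - i*i + i - 1) / i elements (i*i ≤ MAX here).
def pvMAX : Nat := 1000000

def mkSieve : Array Bool :=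
  let a := ((Array.replicate (pvMAX + 1) true).set! 0 false).set! 1 false
  (List.range' 2 999).foldl
    (fun a i =>
      if a[i]! then
        (List.range' (i * i) ((pvMAX + 1 - i * i + i - 1) / i) i).foldl
          (fun a j => a.set! j false) a
      else a) a

-- one step of A's prefix-sum loop: update cnt_p / cnt_g, append (index-order assignment
-- into the preallocated ps arrays ≡ push)
def psStep (s : Array Bool) (st : Array Int × Array Int × Int × Int) (i : Nat) :
    Array Int × Array Int × Int × Int :=
  let cp := if s[i]! then st.2.2.1 + 1 else st.2.2.1
  let cg := if s[i]! && (i == 2 || i % 4 == 1) then st.2.2.2 + 1 else st.2.2.2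
  (st.1.push cp, st.2.1.push cg, cp, cg)

def pvFmt (L U x y : Int) : String :=
  PySem.Int.toStr L ++ " " ++ PySem.Int.toStr U ++ " " ++ PySem.Int.toStr x ++ " " ++ PySem.Int.toStr y

def solve (queries : List (Int × Int)) : List String :=
  let s := mkSieve
  let ps := (List.range (pvMAX + 1)).foldl (psStep s) (#[], #[], 0, 0)
  let psp := ps.1
  let psg := ps.2.1
  queries.foldl
    (fun results LU =>
      let L : Int := LU.1
      let U : Int := LU.2
      let l : Int := max L 2
      -- inside the else-branch 2 ≤ l ≤ U, so .toNat is Python's nonnegative indexing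
      let xy : Int × Int :=
        if l > U then (0, 0)
        else (psp[U.toNat]! - psp[(l - 1).toNat]!, psg[U.toNat]! - psg[(l - 1).toNat]!)
      results ++ [pvFmt L U xy.1 xy.2]) []

-- ===== PORT B =====

-- one step of Source B's per-query scan over n = max(L,2) .. U
def scanStep (s : Array Bool) (xy : Int × Int) (n : Nat) : Int × Int :=
  if s[n]! then (xy.1 + 1, if n == 2 || n % 4 == 1 then xy.2 + 1 else xy.2) else xy

def solve_alt (queries : List (Int × Int)) : List String :=
  let s := mkSieve
  queries.map (fun LU =>
    let L : Int := LU.1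
    let U : Int := LU.2
    -- range(max(L,2), U+1): the start is ≥ 2 so .toNat is exact; empty when U < max(L,2)
    let lo := (max L 2).toNat
    let xy := (List.range' lo (U.toNat + 1 - lo)).foldl (scanStep s) (0, 0)
    pvFmt L U xy.1 xy.2)

-- ===== PRECONDITION & SPEC =====
-- Pre_ excludes exactly the inputs where A raises IndexError: a query whose
-- scanned range is nonempty (max(L,2) ≤ U) but reaches past the sieve (U > 10^6).
def Pre_solve (queries : List (Int × Int)) : Prop :=
  ∀ p ∈ queries, max p.1 2 ≤ p.2 → p.2 ≤ 1000000
instance (queries : List (Int × Int)) : Decidable (Pre_solve queries) := by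
  unfold Pre_solve; infer_instance

def pvWitness_solve : (List (Int × Int)) := [(1, 20), (-3, 2), (10, 4), (0, 0)]

def Spec_solve (queries : List (Int × Int)) (out : List String) : Prop := out = solve_alt queries
instance (queries : List (Int × Int)) (out : List String) : Decidable (Spec_solve queries out) := by
  unfold Spec_solve; infer_instance

-- ===== CLAIM (what is proved, stated in full; the proofs are below) =====
def Claim_equal_solve : Prop :=
  ∀ (queries : List (Int × Int)), Dom_solve queries → Pre_solve queries → Spec_solve queries (solve queries)

-- ===== LEMMAS AND PROOFS =====

-- count (as Int) of indices in List.range k satisfying p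
def pvCnt (p : Nat → Bool) (k : Nat) : Int := (((List.range k).filter p).length : Int)

def pvP (s : Array Bool) (n : Nat) : Bool := s[n]!
def pvG (s : Array Bool) (n : Nat) : Bool := s[n]! && (n == 2 || n % 4 == 1)

theorem pvCnt_succ (p : Nat → Bool) (k : Nat) :
    pvCnt p (k + 1) = pvCnt p k + (if p k then 1 else 0) := by
  by_cases h : p k <;> simp [pvCnt, List.range_succ, List.filter_append, h]

theorem ps_fold (s : Array Bool) (n : Nat) :
    (List.range n).foldl (psStep s) (#[], #[], 0, 0) =
      (((List.range n).map (fun i => pvCnt (pvP s) (i + 1))).toArray,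
       ((List.range n).map (fun i => pvCnt (pvG s) (i + 1))).toArray,
       pvCnt (pvP s) n, pvCnt (pvG s) n) := by
  induction n with
  | zero => simp [pvCnt]
  | succ n ih =>
    rw [List.range_succ, List.foldl_append, ih]
    simp only [List.foldl_cons, List.foldl_nil, psStep, List.map_append, List.map_cons,
      List.map_nil]
    rw [pvCnt_succ (pvP s) n, pvCnt_succ (pvG s) n]
    simp [pvP, pvG]
    constructor
    · split <;> simp
    constructor
    · by_cases h : s[n]! <;> (simp [h]; try (split <;> simp))
    constructor
    · split <;> simp
    · by_cases h : s[n]! <;> (simp [h]; try (split <;> simp))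

theorem getElem!_toArray_map_range (f : Nat → Int) (N j : Nat) (h : j < N) :
    (((List.range N).map f).toArray)[j]! = f j := by
  simp [Array.getElem!_eq_getD, Array.getD]
  exact fun hn => absurd h (by omega)

theorem scan_fold (s : Array Bool) (L : List Nat) (x y : Int) :
    L.foldl (scanStep s) (x, y) =
      (x + ((L.filter (pvP s)).length : Int), y + ((L.filter (pvG s)).length : Int)) := by
  induction L generalizing x y with
  | nil => simp
  | cons n t ih =>
    by_cases h : s[n]!
    · by_cases hg : (n == 2 || n % 4 == 1)
      · simp [scanStep, h, hg, ih, pvP, pvG]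
        omega
      · simp [scanStep, h, hg, ih, pvP, pvG]
        omega
    · simp [scanStep, h, ih, pvP, pvG]

theorem pvCnt_split (p : Nat → Bool) (a b : Nat) (hab : a ≤ b) :
    pvCnt p b = pvCnt p a + (((List.range' a (b - a)).filter p).length : Int) := by
  have : List.range b = List.range a ++ List.range' a (b - a) := by
    rw [show b = a + (b - a) by omega, List.range_eq_range', List.range_eq_range',
      ← List.range'_append]
    simp
  simp [pvCnt, this, List.filter_append]

-- the per-query strings agree whenever the query is inside Pre_
theorem query_eq (s : Array Bool) (L U : Int) (hU : max L 2 ≤ U → U ≤ 1000000) :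
    (let l := max L 2
     let xy : Int × Int :=
       if l > U then (0, 0)
       else
         (((List.range (pvMAX + 1)).map (fun i => pvCnt (pvP s) (i + 1))).toArray[U.toNat]! -
            ((List.range (pvMAX + 1)).map (fun i => pvCnt (pvP s) (i + 1))).toArray[(l - 1).toNat]!,
          ((List.range (pvMAX + 1)).map (fun i => pvCnt (pvG s) (i + 1))).toArray[U.toNat]! -
            ((List.range (pvMAX + 1)).map (fun i => pvCnt (pvG s) (i + 1))).toArray[(l - 1).toNat]!)
     pvFmt L U xy.1 xy.2) =
    (let lo := (max L 2).toNat
     let xy := (List.range' lo (U.toNat + 1 - lo)).foldl (scanStep s) (0, 0)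
     pvFmt L U xy.1 xy.2) := by
  have h2 : (2 : Int) ≤ max L 2 := le_max_right _ _
  by_cases hl : max L 2 > U
  · -- empty range on both sides
    have hrange : U.toNat + 1 - (max L 2).toNat = 0 := by omega
    simp [hl, hrange]
  · rw [not_lt] at hl
    have hU' : U ≤ 1000000 := hU hl
    dsimp only
    set l : Int := max L 2 with hldef
    have hln : 2 ≤ l.toNat := by omega
    have hun : l.toNat ≤ U.toNat := by omega
    have hUM : U.toNat ≤ pvMAX := by unfold pvMAX; omega
    have hgt : ¬ l > U := not_lt.mpr hl
    rw [if_neg hgt]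
    have hidx1 : U.toNat < pvMAX + 1 := by omega
    have hidx2 : (l - 1).toNat < pvMAX + 1 := by omega
    have hl1 : (l - 1).toNat = l.toNat - 1 := by omega
    rw [getElem!_toArray_map_range _ _ _ hidx1, getElem!_toArray_map_range _ _ _ hidx2,
        getElem!_toArray_map_range _ _ _ hidx1, getElem!_toArray_map_range _ _ _ hidx2]
    rw [scan_fold]
    have hl1' : (l - 1).toNat + 1 = l.toNat := by omega
    rw [hl1']
    have hsplitP := pvCnt_split (pvP s) l.toNat (U.toNat + 1) (by omega)
    have hsplitG := pvCnt_split (pvG s) l.toNat (U.toNat + 1) (by omega)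
    simp only [pvFmt]
    congr 2
    · rw [hsplitP]; ring_nf
    · rw [hsplitG]; ring_nf

-- a foldl that appends one element per item is a map
theorem foldl_append_map {α β : Type} (f : α → β) (L : List α) (acc : List β) :
    L.foldl (fun r a => r ++ [f a]) acc = acc ++ L.map f := by
  induction L generalizing acc with
  | nil => simp
  | cons h t ih => simp [ih]

-- ===== VERDICT (by name: the statement is the Claim_ definition above) =====
theorem solve_spec : Claim_equal_solve := by
  intro queries _ hpre
  unfold Spec_solve solve solve_alt
  dsimp only
  rw [ps_fold]
  dsimp only
  rw [foldl_append_map]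
  simp only [List.nil_append]
  apply List.map_congr_left
  intro LU hmem
  exact query_eq mkSieve LU.1 LU.2 (hpre LU hmem)
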